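-- pv_equiv track=rewrite | github.com/francesco-giorgione/DataAugmentation | scripts/vincoli_edu.py | get_edus_list
-- ===== SOURCE A (Python) =====
-- def get_edus_list(data):
--     unique_edus = []
--     for dialogue in data:
--         for turn in dialogue.get('edus', []):
--             edu_text = turn.get('text', "")
--             if edu_text not in unique_edus:  # Controlla se l'elemento è già presente
--                 unique_edus.append(edu_text)
--     return unique_edus
-- ===== SOURCE B (Python) =====
-- def get_edus_list(data):
--     texts = [turn.get('text', "") for dialogue in data
--              for turn in dialogue.get('edus', [])]
--     out = []
--     while texts:
--         head = texts[0]
--         out.append(head)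
--         texts = [t for t in texts if t != head]
--     return out
-- ===== Notes on version B (the rewrite author's own statement) =====
-- stated objective: alternative
-- what changed: Replaces A's single pass with a per-element membership test against the growing output by a staged decomposition: flatten all texts first, then dedup by repeatedly emitting the head of the remaining list and filtering out all of its occurrences (no membership test, shrinking-input loop).
import Mathlib
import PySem

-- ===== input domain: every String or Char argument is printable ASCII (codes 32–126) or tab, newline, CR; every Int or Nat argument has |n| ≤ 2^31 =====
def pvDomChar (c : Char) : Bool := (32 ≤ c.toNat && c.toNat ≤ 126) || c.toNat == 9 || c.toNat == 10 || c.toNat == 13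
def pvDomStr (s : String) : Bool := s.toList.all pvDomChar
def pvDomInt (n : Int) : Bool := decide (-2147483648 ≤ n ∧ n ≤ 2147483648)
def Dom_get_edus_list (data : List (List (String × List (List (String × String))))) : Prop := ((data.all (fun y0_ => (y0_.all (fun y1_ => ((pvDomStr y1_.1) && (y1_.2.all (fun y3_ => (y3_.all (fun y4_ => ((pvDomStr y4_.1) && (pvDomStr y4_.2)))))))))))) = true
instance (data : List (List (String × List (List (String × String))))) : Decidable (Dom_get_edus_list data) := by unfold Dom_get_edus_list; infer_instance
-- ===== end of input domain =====

-- B replaces A's interleaved membership-test-and-append loop by a staged decomposition: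
-- flatten all texts, then dedup by repeatedly emitting the head and filtering out its
-- occurrences from the remaining list; alternative decomposition, not faster.

-- ===== PORT A =====
def get_edus_list (data : List (List (String × List (List (String × String))))) : List String :=
  data.foldl (fun unique_edus dialogue =>
    ((PySem.Dict.ofList dialogue).getD "edus" []).foldl (fun unique_edus turn =>
      let edu_text := (PySem.Dict.ofList turn).getD "text" ""
      if edu_text ∈ unique_edus then unique_edus else unique_edus ++ [edu_text]) unique_edus) []

-- ===== PORT B =====
-- the while loop of Source B: take texts[0], keep only the texts different from it, recurse
def pvDedupHead : List String → List String
  | [] => []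
  | head :: rest => head :: pvDedupHead ((head :: rest).filter (fun t => t != head))
termination_by texts => texts.length
decreasing_by
  simp only [List.filter_cons, bne_self_eq_false, List.length_cons]
  exact Nat.lt_succ_of_le (List.length_filter_le _ _)

def get_edus_list_alt (data : List (List (String × List (List (String × String))))) : List String :=
  let texts := data.flatMap (fun dialogue =>
    ((PySem.Dict.ofList dialogue).getD "edus" []).map (fun turn =>
      (PySem.Dict.ofList turn).getD "text" ""))
  pvDedupHead texts

-- ===== PRECONDITION & SPEC =====
def Spec_get_edus_list (data : List (List (String × List (List (String × String))))) (out : List String) : Prop := out = get_edus_list_alt data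
instance (data : List (List (String × List (List (String × String))))) (out : List String) : Decidable (Spec_get_edus_list data out) := by unfold Spec_get_edus_list; infer_instance

-- ===== CLAIM (what is proved, stated in full; the proofs are below) =====
def Claim_equal_get_edus_list : Prop := ∀ (data : List (List (String × List (List (String × String))))), Dom_get_edus_list data → Spec_get_edus_list data (get_edus_list data)

-- ===== LEMMAS AND PROOFS =====

-- A's inner loop over one dialogue's turns is Set.update of the accumulator with that dialogue's texts
lemma a_inner_eq_update (ts : List (List (String × String))) (acc : List String) :
    ts.foldl (fun unique_edus turn =>
      let edu_text := (PySem.Dict.ofList turn).getD "text" ""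
      if edu_text ∈ unique_edus then unique_edus else unique_edus ++ [edu_text]) acc
    = PySem.Set.update acc (ts.map (fun turn => (PySem.Dict.ofList turn).getD "text" "")) := by
  induction ts generalizing acc with
  | nil => rfl
  | cons t rest ih =>
      simp only [List.foldl_cons, List.map_cons, PySem.Set.update_cons, ih,
        PySem.Set.add_eq_ite]

-- A's whole loop computes Set.ofList of the flattened text list
lemma a_eq_ofList (data : List (List (String × List (List (String × String))))) :
    get_edus_list data = PySem.Set.ofList (data.flatMap (fun dialogue =>
      ((PySem.Dict.ofList dialogue).getD "edus" []).map (fun turn =>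
        (PySem.Dict.ofList turn).getD "text" ""))) := by
  unfold get_edus_list
  suffices h : ∀ (acc : List String), data.foldl (fun unique_edus dialogue =>
      ((PySem.Dict.ofList dialogue).getD "edus" []).foldl (fun unique_edus turn =>
        let edu_text := (PySem.Dict.ofList turn).getD "text" ""
        if edu_text ∈ unique_edus then unique_edus else unique_edus ++ [edu_text]) unique_edus) acc
      = PySem.Set.update acc (data.flatMap (fun dialogue =>
        ((PySem.Dict.ofList dialogue).getD "edus" []).map (fun turn =>
          (PySem.Dict.ofList turn).getD "text" ""))) by
    simpa [PySem.Set.update_nil_left] using h []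
  induction data with
  | nil => intro acc; rfl
  | cons d rest ih =>
      intro acc
      rw [List.foldl_cons, List.flatMap_cons, a_inner_eq_update, ih,
        PySem.Set.update_append]

-- set(xs) commutes with a filter (specific bridge between B's filter loop and Set.ofList)
lemma ofList_filter (p : String → Bool) (xs : List String) :
    PySem.Set.ofList (xs.filter p) = (PySem.Set.ofList xs).filter p := by
  induction xs with
  | nil => rfl
  | cons x xs ih =>
      by_cases hp : p x = true
      · simp only [List.filter_cons, hp, if_true, PySem.Set.ofList_cons, ih,
          PySem.Set.discard, List.filter_comm]
      · simp only [List.filter_cons, hp, Bool.false_eq_true, if_false,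
          PySem.Set.ofList_cons, ih, PySem.Set.discard]
        rw [List.filter_comm]
        symm
        apply List.filter_eq_self.mpr
        intro y hy
        have hyp : p y = true := (List.mem_filter.mp hy).2
        have : y ≠ x := fun h => hp (h ▸ hyp)
        simpa [bne] using this

-- B's head-and-filter loop computes Set.ofList
lemma pvDedupHead_eq_ofList (xs : List String) :
    pvDedupHead xs = PySem.Set.ofList xs := by
  induction xs using pvDedupHead.induct with
  | case1 => rw [pvDedupHead]; rfl
  | case2 head rest ih =>
      rw [pvDedupHead, ih, PySem.Set.ofList_cons]
      congr 1
      simp [ofList_filter, PySem.Set.discard, bne]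

-- ===== VERDICT (by name: the statement is the Claim_ definition above) =====
theorem get_edus_list_spec : Claim_equal_get_edus_list := by
  intro data _
  show get_edus_list data = get_edus_list_alt data
  rw [a_eq_ofList]
  unfold get_edus_list_alt
  rw [pvDedupHead_eq_ofList]
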